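-- pv_equiv track=rewrite | github.com/9172JOSEPHLX/medgemma-ecg-assistant | tools/generate_swap_cases.py | _detect_time_column
-- ===== SOURCE A (Python) =====
-- from typing import Dict, List, Tuple, Optional
--
-- def _detect_time_column(header: List[str]) -> Optional[str]:
--     for h in header:
--         n = h.strip().lower()
--         if n in {"t", "time", "time_s", "time_ms", "sec", "secs", "second", "seconds"}:
--             return h
--     # fallback: wildcard time*/timestamp*
--     for h in header:
--         n = h.strip().lower()
--         if n.startswith("time") or n.startswith("timestamp"):
--             return h
--     return None
-- ===== SOURCE B (Python) =====
-- from typing import List, Optional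
--
-- def _detect_time_column(header: List[str]) -> Optional[str]:
--     fallback = None
--     for h in header:
--         n = h.strip().lower()
--         if n in {"t", "time", "time_s", "time_ms", "sec", "secs", "second", "seconds"}:
--             return h
--         if fallback is None and (n.startswith("time") or n.startswith("timestamp")):
--             fallback = h
--     return fallback
-- ===== Notes on version B (the rewrite author's own statement) =====
-- stated objective: simpler
-- what changed: Replaces A's two full scans of the header with a single pass that returns immediately on an exact match and records the first prefix match in a fallback variable returned at the end.
import Mathlib
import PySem

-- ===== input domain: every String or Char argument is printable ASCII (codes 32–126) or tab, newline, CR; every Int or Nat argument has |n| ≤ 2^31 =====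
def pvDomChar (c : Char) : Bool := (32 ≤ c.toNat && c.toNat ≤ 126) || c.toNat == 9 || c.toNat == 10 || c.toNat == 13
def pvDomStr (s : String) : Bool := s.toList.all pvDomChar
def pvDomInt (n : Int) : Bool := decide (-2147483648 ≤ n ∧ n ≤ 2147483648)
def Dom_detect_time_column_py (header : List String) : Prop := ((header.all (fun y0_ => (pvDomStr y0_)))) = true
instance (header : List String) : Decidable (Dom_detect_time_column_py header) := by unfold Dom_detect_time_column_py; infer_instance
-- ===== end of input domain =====

-- B folds A's two scans into one pass with a fallback variable (simpler; same result).
-- ===== PORT A =====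
def pv_norm (h : String) : String := PySem.Str.lower (PySem.Str.strip h)

def pv_exact : List String := ["t", "time", "time_s", "time_ms", "sec", "secs", "second", "seconds"]

-- first loop of A: exact-name match
def pv_loop1 : List String → Option String
  | [] => none
  | h :: t =>
    let n := pv_norm h
    if n ∈ pv_exact then some h else pv_loop1 t

-- second loop of A: wildcard time*/timestamp* fallback
def pv_loop2 : List String → Option String
  | [] => none
  | h :: t =>
    let n := pv_norm h
    if PySem.Str.startswith n "time" || PySem.Str.startswith n "timestamp" then some h
    else pv_loop2 t

def detect_time_column_py (header : List String) : Option String :=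
  match pv_loop1 header with
  | some h => some h
  | none => pv_loop2 header

-- ===== PORT B =====
-- single pass: return immediately on exact match, remember first prefix match
def pv_go : List String → Option String → Option String
  | [], fallback => fallback
  | h :: t, fallback =>
    let n := pv_norm h
    if n ∈ pv_exact then some h
    else pv_go t (if fallback.isNone && (PySem.Str.startswith n "time" || PySem.Str.startswith n "timestamp") then some h else fallback)

def detect_time_column_py_alt (header : List String) : Option String :=
  pv_go header none

-- ===== PRECONDITION & SPEC =====
def Spec_detect_time_column_py (header : List String) (out : Option String) : Prop := out = detect_time_column_py_alt header
instance (header : List String) (out : Option String) : Decidable (Spec_detect_time_column_py header out) := by unfold Spec_detect_time_column_py; infer_instance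

-- ===== CLAIM (what is proved, stated in full; the proofs are below) =====
def Claim_equal_detect_time_column_py : Prop := ∀ (header : List String), Dom_detect_time_column_py header → Spec_detect_time_column_py header (detect_time_column_py header)

-- ===== LEMMAS AND PROOFS =====

theorem pv_go_eq (l : List String) (fb : Option String) :
    pv_go l fb = match pv_loop1 l with
      | some h => some h
      | none => match fb with
        | some f => some f
        | none => pv_loop2 l := by
  induction l generalizing fb with
  | nil => cases fb <;> rfl
  | cons h t ih =>
    simp only [pv_go, pv_loop1, pv_loop2]
    by_cases hx : pv_norm h ∈ pv_exact
    · simp [hx]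
    · cases hb : (PySem.Str.startswith (pv_norm h) "time" || PySem.Str.startswith (pv_norm h) "timestamp") with
      | false => cases fb <;> simp [hx, hb, ih]
      | true => cases fb <;> simp [hx, hb, ih]

-- ===== VERDICT (by name: the statement is the Claim_ definition above) =====
theorem detect_time_column_py_spec : Claim_equal_detect_time_column_py := by
  intro header _
  show detect_time_column_py header = detect_time_column_py_alt header
  simp only [detect_time_column_py, detect_time_column_py_alt, pv_go_eq]
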